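-- pv_equiv track=rewrite | github.com/ploddingpawn/Team21-IMI-Big-Data-AI-AML-Detection-System | 02-isolation-forest.py | resolve_feature_cols
-- ===== SOURCE A (Python) =====
-- def resolve_feature_cols(patterns, available_cols):
--     matched = []
--     for pattern in patterns:
--         if pattern in available_cols:
--             if pattern not in matched:
--                 matched.append(pattern)
--         else:
--             for col in available_cols:
--                 if pattern in col and col not in matched:
--                     matched.append(col)
--     return matched
-- ===== SOURCE B (Python) =====
-- def resolve_feature_cols(patterns, available_cols):
--     # Recursive decomposition: resolve the first pattern's block on its own,
--     # recurse on the remaining patterns, and splice the suffix result after the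
--     # head block, dropping columns the head block already contains.
--     if not patterns:
--         return []
--     p, rest = patterns[0], patterns[1:]
--     if p in available_cols:
--         head = [p]
--     else:
--         head = list(dict.fromkeys(c for c in available_cols if p in c))
--     tail = resolve_feature_cols(rest, available_cols)
--     return head + [c for c in tail if c not in head]
-- ===== Notes on version B (the rewrite author's own statement) =====
-- stated objective: alternative
-- what changed: B is recursive on patterns: it resolves the first pattern's block independently (deduping only inside that block), recurses on the remaining patterns, and splices the suffix result after the head block while dropping columns already in the head, instead of A's iterative loop threading one growing 'matched' accumulator through every membership check.
import Mathlib
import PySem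

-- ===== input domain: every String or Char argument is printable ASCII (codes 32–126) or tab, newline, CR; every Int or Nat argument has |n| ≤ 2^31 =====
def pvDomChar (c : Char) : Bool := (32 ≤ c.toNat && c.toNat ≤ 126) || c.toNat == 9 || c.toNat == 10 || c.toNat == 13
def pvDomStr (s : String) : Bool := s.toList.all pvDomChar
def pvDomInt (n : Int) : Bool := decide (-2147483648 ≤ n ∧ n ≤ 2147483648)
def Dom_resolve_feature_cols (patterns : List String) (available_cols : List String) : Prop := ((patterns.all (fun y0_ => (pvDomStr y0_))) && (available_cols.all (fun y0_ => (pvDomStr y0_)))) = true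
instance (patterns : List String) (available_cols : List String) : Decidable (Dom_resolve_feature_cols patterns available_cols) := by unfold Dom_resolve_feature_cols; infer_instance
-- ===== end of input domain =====

-- B recursively resolves the first pattern's block, recurses on the rest, and
-- splices the suffix result after the head block (objective: alternative decomposition).

-- ===== PORT A =====
def resolve_feature_cols (patterns : List String) (available_cols : List String) : List String :=
  patterns.foldl (fun matched pattern =>
    if pattern ∈ available_cols then
      if pattern ∈ matched then matched else matched ++ [pattern]
    else
      available_cols.foldl (fun matched col =>
        if PySem.Str.isIn pattern col = true ∧ col ∉ matched then matched ++ [col]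
        else matched) matched) []

-- ===== PORT B =====
def resolve_feature_cols_alt : (patterns : List String) → (available_cols : List String) → List String
  | [], _ => []
  | p :: rest, available_cols =>
    let head := if p ∈ available_cols then [p]
                else PySem.List.dedup (available_cols.filter (fun c => PySem.Str.isIn p c))
    let tail := resolve_feature_cols_alt rest available_cols
    head ++ tail.filter (fun c => decide (c ∉ head))

-- ===== PRECONDITION & SPEC =====
def Spec_resolve_feature_cols (patterns : List String) (available_cols : List String) (out : List String) : Prop := out = resolve_feature_cols_alt patterns available_cols
instance (patterns : List String) (available_cols : List String) (out : List String) : Decidable (Spec_resolve_feature_cols patterns available_cols out) := by unfold Spec_resolve_feature_cols; infer_instance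

-- ===== CLAIM (what is proved, stated in full; the proofs are below) =====
def Claim_equal_resolve_feature_cols : Prop := ∀ (patterns : List String) (available_cols : List String), Dom_resolve_feature_cols patterns available_cols → Spec_resolve_feature_cols patterns available_cols (resolve_feature_cols patterns available_cols)

-- ===== LEMMAS AND PROOFS =====

-- A's guarded append is exactly PySem.Set.add.
lemma add_eq_guard (m : List String) (x : String) :
    PySem.Set.add m x = if x ∈ m then m else m ++ [x] := by
  simp [PySem.Set.add, PySem.Set.contains]

lemma ofList_append (l ys : List String) :
    PySem.Set.ofList (l ++ ys) = ys.foldl PySem.Set.add (PySem.Set.ofList l) := by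
  simp [PySem.Set.ofList_eq_foldl, List.foldl_append]

-- A's inner loop over available_cols equals folding Set.add over the filtered columns.
lemma inner_eq (p : String) (cols m : List String) :
    cols.foldl (fun matched col =>
        if PySem.Str.isIn p col = true ∧ col ∉ matched then matched ++ [col]
        else matched) m
      = (cols.filter (fun col => PySem.Str.isIn p col)).foldl PySem.Set.add m := by
  rw [List.foldl_filter]
  induction cols generalizing m with
  | nil => rfl
  | cons c t ih =>
      simp only [List.foldl_cons]
      rw [ih]
      congr 1
      by_cases h : PySem.Chars.isIn p.toList c.toList = true
      · simp [PySem.Str.isIn, h, add_eq_guard]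
      · simp [PySem.Str.isIn, h]

-- the per-pattern match block, as one list (with duplicates)
def matchesOf (available_cols : List String) (p : String) : List String :=
  if p ∈ available_cols then [p]
  else available_cols.filter (fun col => PySem.Str.isIn p col)

-- A equals first-occurrence dedup of the concatenation of all match blocks.
lemma a_eq_ofList_flat (available_cols patterns : List String) : ∀ l : List String,
    patterns.foldl (fun matched pattern =>
      if pattern ∈ available_cols then
        if pattern ∈ matched then matched else matched ++ [pattern]
      else
        available_cols.foldl (fun matched col =>
          if PySem.Str.isIn pattern col = true ∧ col ∉ matched then matched ++ [col]
          else matched) matched) (PySem.Set.ofList l)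
    = PySem.Set.ofList (l ++ patterns.flatMap (matchesOf available_cols)) := by
  induction patterns with
  | nil => intro l; simp
  | cons p t ih =>
      intro l
      simp only [List.foldl_cons, List.flatMap_cons]
      by_cases hp : p ∈ available_cols
      · simp only [hp, if_pos]
        rw [← add_eq_guard,
            show PySem.Set.add (PySem.Set.ofList l) p = PySem.Set.ofList (l ++ [p]) from by
              simp [ofList_append], ih]
        simp [matchesOf, hp]
      · simp only [hp, if_false]
        rw [inner_eq, show (available_cols.filter (fun col => PySem.Str.isIn p col)).foldl
              PySem.Set.add (PySem.Set.ofList l)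
            = PySem.Set.ofList (l ++ available_cols.filter (fun col => PySem.Str.isIn p col)) from
              (ofList_append _ _).symm, ih]
        simp [matchesOf, hp]

-- first-occurrence dedup of an append: head's dedup, then the tail's dedup minus head's elements.
lemma foldl_add_eq (b : List String) : ∀ s : List String,
    b.foldl PySem.Set.add s = s ++ (PySem.Set.ofList b).filter (fun c => decide (c ∉ s)) := by
  induction b with
  | nil => intro s; simp [PySem.Set.ofList]
  | cons x t ih =>
      intro s
      have hofl : PySem.Set.ofList (x :: t)
          = [x] ++ (PySem.Set.ofList t).filter (fun c => decide (c ∉ ([x] : List String))) := by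
        have : PySem.Set.ofList (x :: t) = t.foldl PySem.Set.add (PySem.Set.add [] x) := by
          simp [PySem.Set.ofList_eq_foldl]
        rw [this, show PySem.Set.add ([] : List String) x = [x] from by simp [PySem.Set.add, PySem.Set.contains], ih]
      simp only [List.foldl_cons]
      rw [ih (PySem.Set.add s x), hofl, add_eq_guard, List.filter_append, List.filter_filter]
      by_cases hx : x ∈ s
      · simp only [if_pos, List.filter_cons, List.filter_nil, decide_eq_true_eq, hx,
          not_true, if_false, List.nil_append]
        congr 1
        apply List.filter_congr
        intro c _
        by_cases hc : c = x
        · subst hc; simp [hx]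
        · simp [hc]
      · simp only [hx, if_neg, not_false_iff, List.filter_cons, List.filter_nil,
          decide_eq_true_eq, if_pos, List.append_assoc, List.singleton_append]
        congr 2
        apply List.filter_congr
        intro c _
        by_cases hc : c = x
        · subst hc; simp [hx]
        · simp [hc]

lemma ofList_append_split (a b : List String) :
    PySem.Set.ofList (a ++ b)
      = PySem.Set.ofList a ++ (PySem.Set.ofList b).filter (fun c => decide (c ∉ a)) := by
  rw [ofList_append, foldl_add_eq]
  congr 1
  apply List.filter_congr
  intro c _
  simp [PySem.Set.mem_ofList]

-- B equals first-occurrence dedup of the concatenation of all match blocks.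
lemma b_eq_ofList_flat (available_cols : List String) : ∀ patterns : List String,
    resolve_feature_cols_alt patterns available_cols
      = PySem.Set.ofList (patterns.flatMap (matchesOf available_cols)) := by
  intro patterns
  induction patterns with
  | nil => simp [resolve_feature_cols_alt, PySem.Set.ofList]
  | cons p t ih =>
      simp only [resolve_feature_cols_alt, List.flatMap_cons]
      rw [ih, ofList_append_split]
      have hhead : (if p ∈ available_cols then [p]
            else PySem.List.dedup (available_cols.filter (fun c => PySem.Str.isIn p c)))
          = PySem.Set.ofList (matchesOf available_cols p) := by
        by_cases hp : p ∈ available_cols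
        · simp [matchesOf, hp, PySem.Set.ofList, PySem.Set.add]
        · simp [matchesOf, hp, PySem.List.dedup_eq_ofList]
      rw [hhead]
      congr 1
      apply List.filter_congr
      intro c _
      simp [PySem.Set.mem_ofList]

-- ===== VERDICT (by name: the statement is the Claim_ definition above) =====
theorem resolve_feature_cols_spec : Claim_equal_resolve_feature_cols := by
  intro patterns available_cols _
  unfold Spec_resolve_feature_cols resolve_feature_cols
  rw [b_eq_ofList_flat]
  exact a_eq_ofList_flat available_cols patterns []
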